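-- pv_equiv track=rewrite | github.com/shallinan1/membership-inference | src/attacks/ngram_coverage_attack/utils.py | split_text_and_newlines
-- ===== SOURCE A (Python) =====
-- from typing import List, Tuple, Optional
--
-- def split_text_and_newlines(text: str) -> Tuple[List[str], List[int]]:
--     """
--     Split text by newlines while tracking the number of consecutive newlines.
--
--     This function separates text into non-empty segments and keeps track of how
--     many newlines appeared between each segment. This is useful for preserving
--     the original formatting when reconstructing text.
--
--     Args:
--         text: The input text containing potential newline characters.
--
--     Returns:
--         A tuple containing:
--             - texts: List of non-empty text segments (stripped of whitespace)
--             - newline_counts: List of integers indicating the number of newlines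
--                             after each text segment (except the last one)
--
--     Example:
--         >>> text = "Hello\\n\\nWorld\\nPython"
--         >>> texts, counts = split_text_and_newlines(text)
--         >>> texts
--         ['Hello', 'World', 'Python']
--         >>> counts
--         [2, 1]
--     """
--     texts = []
--     newline_counts = []
--     parts = text.split("\n")
--     current_text = parts[0]
--     newline_count = 0
--
--     texts.append(current_text.strip())
--
--     for part in parts[1:]:
--         newline_count += 1
--
--         if part.strip() != "":
--             texts.append(part.strip())
--             newline_counts.append(newline_count)
--             newline_count = 0
--
--     return texts, newline_counts
-- ===== SOURCE B (Python) =====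
-- def split_text_and_newlines(text):
--     parts = text.split("\n")
--     kept = [(0, parts[0])] + [(i, p) for i, p in enumerate(parts[1:], 1) if p.strip() != ""]
--     texts = [p.strip() for _, p in kept]
--     newline_counts = [b[0] - a[0] for a, b in zip(kept, kept[1:])]
--     return texts, newline_counts
-- ===== Notes on version B (the rewrite author's own statement) =====
-- stated objective: alternative
-- what changed: A's single loop with a running newline accumulator that resets on each kept segment is replaced by a two-pass index-table decomposition: build the list of kept (index, segment) pairs over the split parts, then read the texts off the pairs and the newline counts as differences of consecutive kept indices.
import Mathlib
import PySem

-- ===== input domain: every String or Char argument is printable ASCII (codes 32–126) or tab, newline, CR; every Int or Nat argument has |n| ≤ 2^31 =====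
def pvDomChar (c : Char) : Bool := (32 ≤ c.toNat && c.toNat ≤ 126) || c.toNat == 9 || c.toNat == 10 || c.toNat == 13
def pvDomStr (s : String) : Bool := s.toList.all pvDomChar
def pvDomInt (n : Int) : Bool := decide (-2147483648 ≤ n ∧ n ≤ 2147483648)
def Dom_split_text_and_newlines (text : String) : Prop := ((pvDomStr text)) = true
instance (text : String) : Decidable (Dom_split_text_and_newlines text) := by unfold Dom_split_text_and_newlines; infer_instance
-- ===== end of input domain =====

-- B replaces A's running newline accumulator by a kept-index table whose consecutive
-- differences are the newline counts (objective: alternative decomposition, same cost).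

-- ===== PORT A =====
def split_text_and_newlines (text : String) : List String × List Int :=
  let parts := (PySem.Str.split? text "\n").getD []   -- sep "\n" is nonempty, so split? is always `some`
  let current_text := parts.headI
  let st := (parts.drop 1).foldl
    (fun (st : List String × List Int × Int) part =>
      let n := st.2.2 + 1
      if PySem.Str.strip part ≠ "" then
        (st.1 ++ [PySem.Str.strip part], st.2.1 ++ [n], 0)
      else
        (st.1, st.2.1, n))
    ([PySem.Str.strip current_text], [], 0)
  (st.1, st.2.1)

-- ===== PORT B =====
def split_text_and_newlines_alt (text : String) : List String × List Int :=
  let parts := (PySem.Str.split? text "\n").getD []   -- sep "\n" is nonempty, so split? is always `some`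
  let kept : List (Int × String) :=
    ((0 : Int), parts.headI) ::
      (PySem.List.enumerate (parts.drop 1) 1).filter
        (fun p => PySem.Str.strip p.2 ≠ "")
  let texts := kept.map (fun p => PySem.Str.strip p.2)
  let newline_counts := (kept.zip (kept.drop 1)).map (fun q => q.2.1 - q.1.1)
  (texts, newline_counts)

-- ===== PRECONDITION & SPEC =====
def Spec_split_text_and_newlines (text : String) (out : List String × List Int) : Prop := out = split_text_and_newlines_alt text
instance (text : String) (out : List String × List Int) : Decidable (Spec_split_text_and_newlines text out) := by unfold Spec_split_text_and_newlines; infer_instance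

-- ===== CLAIM (what is proved, stated in full; the proofs are below) =====
def Claim_equal_split_text_and_newlines : Prop := ∀ (text : String), Dom_split_text_and_newlines text → Spec_split_text_and_newlines text (split_text_and_newlines text)

-- ===== LEMMAS AND PROOFS =====

-- the kept (index, segment) pairs of B over a segment list, enumerated from j
def pvKept (ps : List String) (j : Int) : List (Int × String) :=
  (PySem.List.enumerate ps j).filter (fun p => PySem.Str.strip p.2 ≠ "")

theorem pvKept_nil (j : Int) : pvKept [] j = [] := rfl

theorem pvKept_cons (p : String) (ps : List String) (j : Int) :
    pvKept (p :: ps) j =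
      if PySem.Str.strip p ≠ "" then (j, p) :: pvKept ps (j + 1) else pvKept ps (j + 1) := by
  simp only [pvKept, PySem.List.enumerate_cons, List.filter_cons]
  split_ifs with h <;> simp_all

-- A's loop body, named for the proofs (definitionally the lambda in the port of A)
def pvStep (st : List String × List Int × Int) (part : String) : List String × List Int × Int :=
  let n := st.2.2 + 1
  if PySem.Str.strip part ≠ "" then
    (st.1 ++ [PySem.Str.strip part], st.2.1 ++ [n], 0)
  else
    (st.1, st.2.1, n)

-- loop invariant: from state (ts, cs, n) with j = prev + n + 1, A's fold appends exactly
-- B's stripped kept segments and the consecutive differences of the kept indices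
theorem pvMain (ps : List String) (ts : List String) (cs : List Int)
    (n prev j : Int) (x : String) (hj : j = prev + n + 1) :
    (ps.foldl pvStep (ts, cs, n)).1 =
      ts ++ (pvKept ps j).map (fun p => PySem.Str.strip p.2) ∧
    (ps.foldl pvStep (ts, cs, n)).2.1 =
      cs ++ ((((prev, x) :: pvKept ps j).zip (pvKept ps j)).map (fun q => q.2.1 - q.1.1)) := by
  induction ps generalizing ts cs n prev j x with
  | nil => simp [pvKept_nil]
  | cons p rest ih =>
    rw [pvKept_cons]
    by_cases h : PySem.Str.strip p ≠ ""
    · rw [List.foldl_cons,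
        show pvStep (ts, cs, n) p = (ts ++ [PySem.Str.strip p], cs ++ [n + 1], (0 : Int)) from
          by simp [pvStep, h],
        if_pos h]
      obtain ⟨h1, h2⟩ := ih (ts ++ [PySem.Str.strip p]) (cs ++ [n + 1]) 0 j (j + 1) p (by omega)
      have hnp : n + 1 = j - prev := by omega
      refine ⟨by rw [h1]; simp, ?_⟩
      rw [h2, List.zip_cons_cons, List.map_cons]
      simp [hnp]
    · rw [List.foldl_cons,
        show pvStep (ts, cs, n) p = (ts, cs, n + 1) from by simp [pvStep, h],
        if_neg h]
      exact ih ts cs (n + 1) prev (j + 1) x (by omega)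

-- ===== VERDICT (by name: the statement is the Claim_ definition above) =====
theorem split_text_and_newlines_spec : Claim_equal_split_text_and_newlines := by
  intro text _
  show split_text_and_newlines text = split_text_and_newlines_alt text
  obtain ⟨h1, h2⟩ := pvMain (((PySem.Str.split? text "\n").getD []).drop 1)
    [PySem.Str.strip ((PySem.Str.split? text "\n").getD []).headI] [] 0 0 1
    (((PySem.Str.split? text "\n").getD []).headI) (by ring)
  refine Prod.ext (h1.trans ?_) (h2.trans ?_)
  · simp [pvKept, split_text_and_newlines_alt]
  · simp [pvKept, split_text_and_newlines_alt]
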